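-- pv_equiv track=rewrite | github.com/addict4ever/Kds | decoupe_sprite_egale.py | get_content_ranges
-- ===== SOURCE A (Python) =====
-- def get_content_ranges(data, threshold):
--     """Trouve les segments de contenu (lignes ou colonnes)."""
--     ranges = []
--     start = None
--     for i, has_content in enumerate(data):
--         if has_content and start is None:
--             start = i
--         elif not has_content and start is not None:
--             if i - start > 2:  # Sensibilité ajustée
--                 ranges.append((start, i))
--             start = None
--     if start is not None:
--         ranges.append((start, len(data)))
--     return ranges
-- ===== SOURCE B (Python) =====
-- def get_content_ranges(data, threshold):
--     """Trouve les segments de contenu (lignes ou colonnes)."""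
--     # pass 1: run-length encode the data by truthiness
--     runs = []
--     for x in data:
--         b = bool(x)
--         if runs and runs[-1][0] == b:
--             runs[-1][1] += 1
--         else:
--             runs.append([b, 1])
--     # pass 2: keep truthy runs longer than 2 or reaching the end of the data
--     n = len(data)
--     ranges = []
--     offset = 0
--     for b, length in runs:
--         if b and (length > 2 or offset + length == n):
--             ranges.append((offset, offset + length))
--         offset += length
--     return ranges
-- ===== Notes on version B (the rewrite author's own statement) =====
-- stated objective: alternative
-- what changed: B first run-length encodes the data into maximal truthy/falsy runs, then filters the truthy runs (length > 2 or reaching the end), replacing A's inline start/None state machine.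
import Mathlib
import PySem

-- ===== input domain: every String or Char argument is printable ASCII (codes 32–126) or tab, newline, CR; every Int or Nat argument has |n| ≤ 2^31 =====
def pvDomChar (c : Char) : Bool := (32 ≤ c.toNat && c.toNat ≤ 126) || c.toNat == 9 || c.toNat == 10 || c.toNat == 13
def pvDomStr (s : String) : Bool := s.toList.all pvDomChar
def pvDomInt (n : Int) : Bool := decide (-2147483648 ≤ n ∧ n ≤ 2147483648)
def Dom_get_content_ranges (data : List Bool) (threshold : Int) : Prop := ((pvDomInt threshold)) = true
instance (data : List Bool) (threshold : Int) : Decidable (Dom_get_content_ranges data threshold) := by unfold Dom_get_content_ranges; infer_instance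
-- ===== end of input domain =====

-- B replaces A's inline start/None state machine by run-length encoding then filtering the runs (alternative decomposition, same O(n) cost).

-- ===== PORT A =====
-- the for-loop over enumerate(data) with state (ranges, start), index carried explicitly
def pvGoA (i : Int) (ranges : List (Int × Int)) (start : Option Int) :
    List Bool → List (Int × Int) × Option Int
  | [] => (ranges, start)
  | has :: xs =>
    match start with
    | none =>
      if has then pvGoA (i + 1) ranges (some i) xs
      else pvGoA (i + 1) ranges none xs
    | some s =>
      if has then pvGoA (i + 1) ranges (some s) xs
      else pvGoA (i + 1) (if i - s > 2 then ranges ++ [(s, i)] else ranges) none xs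

-- the trailing 'if start is not None' after the loop
def pvFinishA (st : List (Int × Int) × Option Int) (n : Int) : List (Int × Int) :=
  match st with
  | (ranges, none) => ranges
  | (ranges, some s) => ranges ++ [(s, n)]

def get_content_ranges (data : List Bool) (threshold : Int) : List (Int × Int) :=
  pvFinishA (pvGoA 0 [] none data) (data.length : Int)

-- ===== PORT B =====
-- pass 1 of Source B: extend the last run or append a fresh one
def pvRleStep (runs : List (Bool × Int)) (b : Bool) : List (Bool × Int) :=
  match runs.getLast? with
  | some (b', cnt) => if b' = b then runs.dropLast ++ [(b', cnt + 1)] else runs ++ [(b, 1)]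
  | none => runs ++ [(b, 1)]

-- pass 2 of Source B: filter the truthy runs, keeping a running offset
def pvGoB (n : Int) (ranges : List (Int × Int)) (offset : Int) :
    List (Bool × Int) → List (Int × Int)
  | [] => ranges
  | (b, len) :: rest =>
    pvGoB n
      (if b ∧ (len > 2 ∨ offset + len = n) then ranges ++ [(offset, offset + len)] else ranges)
      (offset + len) rest

def get_content_ranges_alt (data : List Bool) (threshold : Int) : List (Int × Int) :=
  pvGoB (data.length : Int) [] 0 (data.foldl pvRleStep [])

-- ===== PRECONDITION & SPEC =====
def Spec_get_content_ranges (data : List Bool) (threshold : Int) (out : List (Int × Int)) : Prop := out = get_content_ranges_alt data threshold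
instance (data : List Bool) (threshold : Int) (out : List (Int × Int)) : Decidable (Spec_get_content_ranges data threshold out) := by unfold Spec_get_content_ranges; infer_instance

-- ===== CLAIM (what is proved, stated in full; the proofs are below) =====
def Claim_equal_get_content_ranges : Prop := ∀ (data : List Bool) (threshold : Int), Dom_get_content_ranges data threshold → Spec_get_content_ranges data threshold (get_content_ranges data threshold)

-- ===== LEMMAS AND PROOFS =====

-- reference run-length encoding: current run has value b and length n so far
def pvRleFrom (b : Bool) (n : Int) : List Bool → List (Bool × Int)
  | [] => [(b, n)]
  | x :: xs => if x = b then pvRleFrom b (n + 1) xs else (b, n) :: pvRleFrom x 1 xs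

lemma pvRle_acc (xs : List Bool) : ∀ (runs : List (Bool × Int)) (b : Bool) (n : Int),
    List.foldl pvRleStep (runs ++ [(b, n)]) xs = runs ++ pvRleFrom b n xs := by
  induction xs with
  | nil => intro runs b n; simp [pvRleFrom]
  | cons x xs ih =>
    intro runs b n
    simp only [List.foldl_cons, pvRleFrom]
    by_cases h : x = b
    · subst h
      simp [pvRleStep, ih]
    · have hb : b ≠ x := fun e => h e.symm
      simp only [pvRleStep, List.getLast?_concat, if_neg hb, if_neg h]
      rw [List.append_assoc] at *
      have := ih (runs ++ [(b, n)]) x 1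
      simpa using this

lemma pvRle_eq (data : List Bool) :
    List.foldl pvRleStep [] data =
      (match data with | [] => [] | x :: xs => pvRleFrom x 1 xs) := by
  cases data with
  | nil => rfl
  | cons x xs =>
    have h0 : pvRleStep [] x = [] ++ [(x, 1)] := by simp [pvRleStep]
    simp only [List.foldl_cons, h0]
    simpa using pvRle_acc xs [] x 1

lemma pvMain (xs : List Bool) : ∀ (i : Int) (ranges : List (Int × Int)),
    (pvFinishA (pvGoA i ranges none xs) (i + (xs.length : Int)) =
      pvGoB (i + (xs.length : Int)) ranges i
        (match xs with | [] => [] | x :: t => pvRleFrom x 1 t))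
    ∧ (∀ s : Int, pvFinishA (pvGoA i ranges (some s) xs) (i + (xs.length : Int)) =
      pvGoB (i + (xs.length : Int)) ranges s (pvRleFrom true (i - s) xs))
    ∧ (∀ m : Int, pvFinishA (pvGoA i ranges none xs) (i + (xs.length : Int)) =
      pvGoB (i + (xs.length : Int)) ranges (i - m) (pvRleFrom false m xs)) := by
  induction xs with
  | nil =>
    intro i ranges
    refine ⟨by simp [pvGoA, pvGoB, pvFinishA], ?_, ?_⟩
    · intro s
      have hs : s + (i - s) = i + (0:Int) := by ring
      simp [pvGoA, pvFinishA, pvRleFrom, pvGoB, hs]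
    · intro m
      simp [pvGoA, pvFinishA, pvRleFrom, pvGoB]
  | cons x xs ih =>
    intro i ranges
    have hnn : (0:Int) ≤ (xs.length : Int) := Int.natCast_nonneg _
    refine ⟨?_, ?_, ?_⟩
    · -- L1: start = none, fresh position
      cases x with
      | true =>
        have h := (ih (i + 1) ranges).2.1 i
        have h1 : i + 1 - i = (1:Int) := by ring
        rw [h1] at h
        have hn : i + ((true :: xs).length : Int) = i + 1 + (xs.length : Int) := by
          simp; ring
        rw [hn]
        simpa [pvGoA] using h
      | false =>
        have h := (ih (i + 1) ranges).2.2 1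
        have h1 : i + 1 - 1 = i := by ring
        rw [h1] at h
        have hn : i + ((false :: xs).length : Int) = i + 1 + (xs.length : Int) := by
          simp; ring
        rw [hn]
        simpa [pvGoA] using h
    · -- L2: inside a truthy run begun at s
      intro s
      cases x with
      | true =>
        have h := (ih (i + 1) ranges).2.1 s
        have hn : i + ((true :: xs).length : Int) = i + 1 + (xs.length : Int) := by
          simp; ring
        rw [hn]
        rw [show pvRleFrom true (i - s) (true :: xs) = pvRleFrom true (i - s + 1) xs from by
          simp [pvRleFrom]]
        rw [show i - s + 1 = i + 1 - s from by ring]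
        simpa [pvGoA] using h
      | false =>
        -- the truthy run (length i - s) ends here; a falsy run of length 1 starts
        have h := (ih (i + 1) (if i - s > 2 then ranges ++ [(s, i)] else ranges)).2.2 1
        have h1 : i + 1 - 1 = i := by ring
        rw [h1] at h
        have hn : i + ((false :: xs).length : Int) = i + 1 + (xs.length : Int) := by
          simp; ring
        rw [hn]
        rw [show pvRleFrom true (i - s) (false :: xs) = (true, i - s) :: pvRleFrom false 1 xs from by
          simp [pvRleFrom]]
        simp only [pvGoB]
        have hso : s + (i - s) = i := by ring
        rw [hso]
        have hcond : (True ∧ (i - s > 2 ∨ i = i + 1 + (xs.length : Int))) ↔ (i - s > 2) := by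
          constructor
          · rintro ⟨-, h2 | h2⟩
            · exact h2
            · omega
          · intro h2; exact ⟨trivial, Or.inl h2⟩
        simp only [hcond]
        simpa [pvGoA] using h
    · -- L3: inside a falsy run of length m ending at i
      intro m
      cases x with
      | true =>
        have h := (ih (i + 1) ranges).2.1 i
        have h1 : i + 1 - i = (1:Int) := by ring
        rw [h1] at h
        have hn : i + ((true :: xs).length : Int) = i + 1 + (xs.length : Int) := by
          simp; ring
        rw [hn]
        rw [show pvRleFrom false m (true :: xs) = (false, m) :: pvRleFrom true 1 xs from by
          simp [pvRleFrom]]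
        simp only [pvGoB]
        have hcm : i - m + m = i := by ring
        rw [if_neg (by simp : ¬ (false = true ∧ (m > 2 ∨ i - m + m = i + 1 + (xs.length : Int)))), hcm]
        simpa [pvGoA] using h
      | false =>
        have h := (ih (i + 1) ranges).2.2 (m + 1)
        have h1 : i + 1 - (m + 1) = i - m := by ring
        rw [h1] at h
        have hn : i + ((false :: xs).length : Int) = i + 1 + (xs.length : Int) := by
          simp; ring
        rw [hn]
        rw [show pvRleFrom false m (false :: xs) = pvRleFrom false (m + 1) xs from by
          simp [pvRleFrom]]
        simpa [pvGoA] using h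

-- ===== VERDICT (by name: the statement is the Claim_ definition above) =====
theorem get_content_ranges_spec : Claim_equal_get_content_ranges := by
  intro data threshold _
  unfold Spec_get_content_ranges get_content_ranges get_content_ranges_alt
  rw [pvRle_eq]
  have h := (pvMain data 0 []).1
  simpa using h
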